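-- pv_equiv track=rewrite | github.com/Yumezuki/PSCP-Y1 | P-25/Phasmophobia.py | ghost_type
-- ===== SOURCE A (Python) =====
-- def re_ghost(ghost, i):
--     """REMOVE"""
--     if i in ghost:
--         ghost.remove(i)
--     return ghost
--
-- def ghost_type(lst):
--     """GHOST TYPE"""
--     ghost = ["Banshee", "Demon", "Jinn", "Mare", "Oni", "Phantom", \
--              "Poltergeist", "Revenant", "Shade", "Spirit", "Wraith", \
--              "Yurei"]
--     if "EMF Level 5" in lst:
--         for i in ["Demon", "Mare", "Poltergeist", "Spirit", "Wraith", "Yurei"]: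
--             ghost = re_ghost(ghost, i)
--     if "Ghost Writing" in lst:
--         for i in ["Banshee", "Jinn", "Mare", "Phantom", "Poltergeist", "Wraith"]:
--             ghost = re_ghost(ghost, i)
--     if "Fingerprints" in lst:
--         for i in ["Demon", "Jinn", "Mare", "Oni", "Phantom", "Shade", "Yurei"]:
--             ghost = re_ghost(ghost, i)
--     if "Spirit Box" in lst:
--         for i in ["Banshee", "Phantom", "Revenant", "Shade", "Yurei"]:
--             ghost = re_ghost(ghost, i)
--     if "Freezing Temperatures" in lst:
--         for i in ["Jinn", "Oni", "Poltergeist", "Revenant", "Shade", "Spirit"]: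
--             ghost = re_ghost(ghost, i)
--     if "Ghost Orb" in lst:
--         for i in ["Banshee", "Demon", "Oni", "Revenant", "Spirit", "Wraith"]:
--             ghost = re_ghost(ghost, i)
--     return ghost
-- ===== SOURCE B (Python) =====
-- GHOSTS = ["Banshee", "Demon", "Jinn", "Mare", "Oni", "Phantom",
--           "Poltergeist", "Revenant", "Shade", "Spirit", "Wraith", "Yurei"]
--
-- EVIDENCES = ["EMF Level 5", "Ghost Writing", "Fingerprints",
--              "Spirit Box", "Freezing Temperatures", "Ghost Orb"]
--
-- # for each ghost, the evidences that do NOT rule it out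
-- COMPAT = {
--     "Banshee":     {"EMF Level 5", "Fingerprints", "Freezing Temperatures"},
--     "Demon":       {"Ghost Writing", "Spirit Box", "Freezing Temperatures"},
--     "Jinn":        {"EMF Level 5", "Spirit Box", "Ghost Orb"},
--     "Mare":        {"Spirit Box", "Freezing Temperatures", "Ghost Orb"},
--     "Oni":         {"EMF Level 5", "Ghost Writing", "Spirit Box"},
--     "Phantom":     {"EMF Level 5", "Freezing Temperatures", "Ghost Orb"},
--     "Poltergeist": {"Fingerprints", "Spirit Box", "Ghost Orb"},
--     "Revenant":    {"EMF Level 5", "Ghost Writing", "Fingerprints"},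
--     "Shade":       {"EMF Level 5", "Ghost Writing", "Ghost Orb"},
--     "Spirit":      {"Ghost Writing", "Fingerprints", "Spirit Box"},
--     "Wraith":      {"Fingerprints", "Spirit Box", "Freezing Temperatures"},
--     "Yurei":       {"Ghost Writing", "Freezing Temperatures", "Ghost Orb"},
-- }
--
-- def ghost_type(lst):
--     """GHOST TYPE"""
--     present = [e for e in EVIDENCES if e in lst]
--     return [g for g in GHOSTS if all(e in COMPAT[g] for e in present)]
-- ===== Notes on version B (the rewrite author's own statement) =====
-- stated objective: simpler
-- what changed: Replaced the six if-blocks of iterative list removals with a per-ghost compatibility table and a single filtering pass keeping each ghost iff every present evidence is compatible with it.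
import Mathlib
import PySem

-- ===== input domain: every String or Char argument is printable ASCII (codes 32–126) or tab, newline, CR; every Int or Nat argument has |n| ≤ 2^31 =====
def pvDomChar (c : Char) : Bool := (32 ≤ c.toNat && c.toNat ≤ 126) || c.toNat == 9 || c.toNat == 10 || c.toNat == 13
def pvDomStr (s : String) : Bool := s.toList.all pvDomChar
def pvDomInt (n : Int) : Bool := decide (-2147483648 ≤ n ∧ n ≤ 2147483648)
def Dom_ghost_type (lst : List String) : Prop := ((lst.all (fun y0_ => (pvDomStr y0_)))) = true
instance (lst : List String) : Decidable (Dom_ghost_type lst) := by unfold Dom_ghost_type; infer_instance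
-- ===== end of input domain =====

-- B replaces A's six conditional removal loops with a per-ghost compatibility table and one filtering pass (simpler, same cost).

-- ===== PORT A =====
def re_ghost (ghost : List String) (i : String) : List String :=
  if i ∈ ghost then (PySem.List.remove? ghost i).getD ghost else ghost

def ghost_type (lst : List String) : List String :=
  let ghost := ["Banshee", "Demon", "Jinn", "Mare", "Oni", "Phantom",
                "Poltergeist", "Revenant", "Shade", "Spirit", "Wraith", "Yurei"]
  let ghost := if "EMF Level 5" ∈ lst then
      ["Demon", "Mare", "Poltergeist", "Spirit", "Wraith", "Yurei"].foldl re_ghost ghost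
    else ghost
  let ghost := if "Ghost Writing" ∈ lst then
      ["Banshee", "Jinn", "Mare", "Phantom", "Poltergeist", "Wraith"].foldl re_ghost ghost
    else ghost
  let ghost := if "Fingerprints" ∈ lst then
      ["Demon", "Jinn", "Mare", "Oni", "Phantom", "Shade", "Yurei"].foldl re_ghost ghost
    else ghost
  let ghost := if "Spirit Box" ∈ lst then
      ["Banshee", "Phantom", "Revenant", "Shade", "Yurei"].foldl re_ghost ghost
    else ghost
  let ghost := if "Freezing Temperatures" ∈ lst then
      ["Jinn", "Oni", "Poltergeist", "Revenant", "Shade", "Spirit"].foldl re_ghost ghost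
    else ghost
  let ghost := if "Ghost Orb" ∈ lst then
      ["Banshee", "Demon", "Oni", "Revenant", "Spirit", "Wraith"].foldl re_ghost ghost
    else ghost
  ghost

-- ===== PORT B =====
def pvGhosts : List String :=
  ["Banshee", "Demon", "Jinn", "Mare", "Oni", "Phantom",
   "Poltergeist", "Revenant", "Shade", "Spirit", "Wraith", "Yurei"]

def pvEvidences : List String :=
  ["EMF Level 5", "Ghost Writing", "Fingerprints",
   "Spirit Box", "Freezing Temperatures", "Ghost Orb"]

-- the COMPAT dict of Source B: for each ghost, the evidences that do NOT rule it out
def pvCompat : PySem.Dict String (List String) := PySem.Dict.ofList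
  [("Banshee",     ["EMF Level 5", "Fingerprints", "Freezing Temperatures"]),
   ("Demon",       ["Ghost Writing", "Spirit Box", "Freezing Temperatures"]),
   ("Jinn",        ["EMF Level 5", "Spirit Box", "Ghost Orb"]),
   ("Mare",        ["Spirit Box", "Freezing Temperatures", "Ghost Orb"]),
   ("Oni",         ["EMF Level 5", "Ghost Writing", "Spirit Box"]),
   ("Phantom",     ["EMF Level 5", "Freezing Temperatures", "Ghost Orb"]),
   ("Poltergeist", ["Fingerprints", "Spirit Box", "Ghost Orb"]),
   ("Revenant",    ["EMF Level 5", "Ghost Writing", "Fingerprints"]),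
   ("Shade",       ["EMF Level 5", "Ghost Writing", "Ghost Orb"]),
   ("Spirit",      ["Ghost Writing", "Fingerprints", "Spirit Box"]),
   ("Wraith",      ["Fingerprints", "Spirit Box", "Freezing Temperatures"]),
   ("Yurei",       ["Ghost Writing", "Freezing Temperatures", "Ghost Orb"])]

def ghost_type_alt (lst : List String) : List String :=
  let present := pvEvidences.filter (fun e => e ∈ lst)
  pvGhosts.filter (fun g => present.all (fun e => e ∈ (pvCompat.getD g [])))

-- ===== PRECONDITION & SPEC =====
def Spec_ghost_type (lst : List String) (out : List String) : Prop := out = ghost_type_alt lst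
instance (lst : List String) (out : List String) : Decidable (Spec_ghost_type lst out) := by unfold Spec_ghost_type; infer_instance

-- ===== CLAIM (what is proved, stated in full; the proofs are below) =====
def Claim_equal_ghost_type : Prop := ∀ (lst : List String), Dom_ghost_type lst → Spec_ghost_type lst (ghost_type lst)


-- ===== LEMMAS AND PROOFS =====

-- boolean-parameterised form of port A (same fold structure, memberships abstracted)
def ghostA (b1 b2 b3 b4 b5 b6 : Bool) : List String :=
  let ghost := ["Banshee", "Demon", "Jinn", "Mare", "Oni", "Phantom",
                "Poltergeist", "Revenant", "Shade", "Spirit", "Wraith", "Yurei"]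
  let ghost := if b1 then
      ["Demon", "Mare", "Poltergeist", "Spirit", "Wraith", "Yurei"].foldl re_ghost ghost
    else ghost
  let ghost := if b2 then
      ["Banshee", "Jinn", "Mare", "Phantom", "Poltergeist", "Wraith"].foldl re_ghost ghost
    else ghost
  let ghost := if b3 then
      ["Demon", "Jinn", "Mare", "Oni", "Phantom", "Shade", "Yurei"].foldl re_ghost ghost
    else ghost
  let ghost := if b4 then
      ["Banshee", "Phantom", "Revenant", "Shade", "Yurei"].foldl re_ghost ghost
    else ghost
  let ghost := if b5 then
      ["Jinn", "Oni", "Poltergeist", "Revenant", "Shade", "Spirit"].foldl re_ghost ghost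
    else ghost
  let ghost := if b6 then
      ["Banshee", "Demon", "Oni", "Revenant", "Spirit", "Wraith"].foldl re_ghost ghost
    else ghost
  ghost

-- boolean-parameterised form of port B
def ghostB (b1 b2 b3 b4 b5 b6 : Bool) : List String :=
  let present := (if b1 then ["EMF Level 5"] else []) ++ (if b2 then ["Ghost Writing"] else []) ++
                 (if b3 then ["Fingerprints"] else []) ++ (if b4 then ["Spirit Box"] else []) ++
                 (if b5 then ["Freezing Temperatures"] else []) ++ (if b6 then ["Ghost Orb"] else [])
  pvGhosts.filter (fun g => present.all (fun e => e ∈ (pvCompat.getD g [])))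

theorem ghostA_eq (lst : List String) :
    ghost_type lst = ghostA (decide (("EMF Level 5" : String) ∈ lst)) (decide (("Ghost Writing" : String) ∈ lst))
      (decide (("Fingerprints" : String) ∈ lst)) (decide (("Spirit Box" : String) ∈ lst))
      (decide (("Freezing Temperatures" : String) ∈ lst)) (decide (("Ghost Orb" : String) ∈ lst)) := by
  unfold ghost_type ghostA
  by_cases h1 : ("EMF Level 5" : String) ∈ lst <;>
  by_cases h2 : ("Ghost Writing" : String) ∈ lst <;>
  by_cases h3 : ("Fingerprints" : String) ∈ lst <;>
  by_cases h4 : ("Spirit Box" : String) ∈ lst <;>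
  by_cases h5 : ("Freezing Temperatures" : String) ∈ lst <;>
  by_cases h6 : ("Ghost Orb" : String) ∈ lst <;>
  simp [h1, h2, h3, h4, h5, h6]

theorem ghostB_eq (lst : List String) :
    ghost_type_alt lst = ghostB (decide (("EMF Level 5" : String) ∈ lst)) (decide (("Ghost Writing" : String) ∈ lst))
      (decide (("Fingerprints" : String) ∈ lst)) (decide (("Spirit Box" : String) ∈ lst))
      (decide (("Freezing Temperatures" : String) ∈ lst)) (decide (("Ghost Orb" : String) ∈ lst)) := by
  unfold ghost_type_alt ghostB pvEvidences
  by_cases h1 : ("EMF Level 5" : String) ∈ lst <;>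
  by_cases h2 : ("Ghost Writing" : String) ∈ lst <;>
  by_cases h3 : ("Fingerprints" : String) ∈ lst <;>
  by_cases h4 : ("Spirit Box" : String) ∈ lst <;>
  by_cases h5 : ("Freezing Temperatures" : String) ∈ lst <;>
  by_cases h6 : ("Ghost Orb" : String) ∈ lst <;>
  simp [h1, h2, h3, h4, h5, h6, List.filter]

set_option maxRecDepth 100000 in
theorem ghostAB (b1 b2 b3 b4 b5 b6 : Bool) : ghostA b1 b2 b3 b4 b5 b6 = ghostB b1 b2 b3 b4 b5 b6 := by
  cases b1 <;> cases b2 <;> cases b3 <;> cases b4 <;> cases b5 <;> cases b6 <;> rfl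

-- ===== VERDICT (by name: the statement is the Claim_ definition above) =====
theorem ghost_type_spec : Claim_equal_ghost_type := by
  intro lst _
  unfold Spec_ghost_type
  rw [ghostA_eq, ghostB_eq, ghostAB]
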